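-- pv_equiv track=rewrite | github.com/justanotherbyte/aoc2023 | day7/task2.py | wrap_calc_for_j
-- ===== SOURCE A (Python) =====
-- from enum import IntEnum
--
-- labels = ["J", "2", "3", "4", "5", "6", "7", "8", "9", "T", "Q", "K", "A"]
--
-- class CardStrength(IntEnum):
--     FiveOfAKind     = 6
--     FourOfAKind     = 5
--     FullHouse       = 4
--     ThreeOfAKind    = 3
--     TwoPair         = 2
--     OnePair         = 1
--     HighCard        = 0
--
-- def calc_card_strength(card: str) -> CardStrength:
--     components: dict[str, int] = {}
--     for char in card:
--         if char not in components:
--             components[char] = 1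
--         else:
--             components[char] += 1
--
--     # five of a kind
--     if len(components) == 1:
--         return CardStrength.FiveOfAKind
--
--     # four of a kind
--     if 4 in components.values():
--         return CardStrength.FourOfAKind
--
--     if 3 in components.values() and len(components) == 2:
--         return CardStrength.FullHouse
--
--     if 3 in components.values() and len(components) == 3:
--         return CardStrength.ThreeOfAKind
--
--     if 2 in components.values() and len(components) == 3:
--         return CardStrength.TwoPair
--
--     if 2 in components.values() and len(components) == 4:
--         return CardStrength.OnePair
--
--     return CardStrength.HighCard
--
-- def wrap_calc_for_j(card: str) -> CardStrength:
--     outcomes = {}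
--     for label in labels:
--         new_card = card.replace("J", label)
--         strength = calc_card_strength(new_card)
--         outcomes[label] = strength
--
--     max_label = max(outcomes, key= lambda x: outcomes[x])
--     return outcomes[max_label]
-- ===== SOURCE B (Python) =====
-- def _strength(vals):
--     n = len(vals)
--     if n == 1:
--         return 6
--     if 4 in vals:
--         return 5
--     if 3 in vals:
--         if n == 2:
--             return 4
--         if n == 3:
--             return 3
--     if 2 in vals:
--         if n == 3:
--             return 2
--         if n == 4:
--             return 1
--     return 0
--
-- def _grow(vals, j, c):
--     i = vals.index(c)
--     return _strength(vals[:i] + [c + j] + vals[i + 1:])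
--
-- def wrap_calc_for_j(card: str):
--     counts = {}
--     for ch in card:
--         counts[ch] = counts.get(ch, 0) + 1
--     j = counts.pop("J", 0)
--     vals = list(counts.values())
--     if j == 0:
--         return _strength(vals)
--     # jokers can become a label absent from the hand (one new group of size j) ...
--     best = _strength(vals + [j])
--     # ... or merge into any label group already present (distinct sizes only)
--     for c in set(counts[l] for l in "23456789TQKA" if l in counts):
--         best = max(best, _grow(vals, j, c))
--     return best
-- ===== Notes on version B (the rewrite author's own statement) =====
-- stated objective: faster
-- what changed: Instead of rebuilding the whole hand and recounting it for each of the 13 joker substitutions, B counts characters once, pops the joker count j, and takes the max category over the distinct label-group sizes grown by j plus one fresh group of size j.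
import Mathlib
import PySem

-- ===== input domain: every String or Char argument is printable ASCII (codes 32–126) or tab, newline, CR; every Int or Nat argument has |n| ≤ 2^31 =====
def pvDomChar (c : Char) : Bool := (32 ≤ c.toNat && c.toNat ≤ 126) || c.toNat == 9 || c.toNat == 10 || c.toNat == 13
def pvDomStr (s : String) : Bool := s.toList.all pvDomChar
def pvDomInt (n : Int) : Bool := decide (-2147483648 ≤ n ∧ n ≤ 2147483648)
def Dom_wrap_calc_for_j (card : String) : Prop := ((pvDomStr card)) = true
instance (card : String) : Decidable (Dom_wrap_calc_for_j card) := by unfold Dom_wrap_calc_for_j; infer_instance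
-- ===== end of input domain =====

-- B replaces A's 13 full replace-and-recount passes by one character counter plus
-- direct surgery on the distinct group sizes (objective: faster, constant-factor/asymptotic in the label count).


-- ===== PORT A =====
def pvLabels : List String := ["J", "2", "3", "4", "5", "6", "7", "8", "9", "T", "Q", "K", "A"]

def calc_card_strength (card : String) : Int :=
  let components := card.toList.foldl
    (fun d ch =>
      if d.contains ch then
        -- components[char] += 1  (the key is present in this branch)
        d.insert ch (d.getD ch 0 + 1)
      else d.insert ch 1)
    PySem.Dict.empty
  if components.size = 1 then 6
  else if (4 : Int) ∈ components.values then 5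
  else if (3 : Int) ∈ components.values ∧ components.size = 2 then 4
  else if (3 : Int) ∈ components.values ∧ components.size = 3 then 3
  else if (2 : Int) ∈ components.values ∧ components.size = 3 then 2
  else if (2 : Int) ∈ components.values ∧ components.size = 4 then 1
  else 0

def wrap_calc_for_j (card : String) : Int :=
  let outcomes := pvLabels.foldl
    (fun d label => d.insert label (calc_card_strength (PySem.Str.replace card "J" label)))
    PySem.Dict.empty
  match PySem.List.max? outcomes.keys (fun x => outcomes.getD x 0) with
  | some m => outcomes.getD m 0
  | none => 0   -- unreachable: pvLabels is nonempty, so the dict has keys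

-- ===== PORT B =====
def pvStrength (vals : List Int) : Int :=
  let n := vals.length
  if n = 1 then 6
  else if (4 : Int) ∈ vals then 5
  else if (3 : Int) ∈ vals ∧ n = 2 then 4
  else if (3 : Int) ∈ vals ∧ n = 3 then 3
  else if (2 : Int) ∈ vals ∧ n = 3 then 2
  else if (2 : Int) ∈ vals ∧ n = 4 then 1
  else 0

def pvGrow (vals : List Int) (j c : Int) : Int :=
  let i : Nat := (PySem.List.index? vals c).getD 0   -- i = vals.index(c); c is always present here
  pvStrength (PySem.List.slice vals none (some (i : Int)) ++ [c + j] ++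
              PySem.List.slice vals (some ((i : Int) + 1)) none)

def wrap_calc_for_j_alt (card : String) : Int :=
  let counts0 := card.toList.foldl (fun d ch => d.insert ch (d.getD ch 0 + 1)) PySem.Dict.empty
  -- j = counts.pop("J", 0)
  let j := counts0.getD 'J' 0
  let counts := counts0.erase 'J'
  let vals := counts.values
  if j = 0 then pvStrength vals
  else
    let best0 := pvStrength (vals ++ [j])
    let cands := PySem.Set.ofList
      ((("23456789TQKA".toList).filter (fun l => counts.contains l)).map (fun l => counts.getD l 0))
    cands.foldl (fun best c => max best (pvGrow vals j c)) best0

-- ===== PRECONDITION & SPEC =====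
def Spec_wrap_calc_for_j (card : String) (out : Int) : Prop := out = wrap_calc_for_j_alt card
instance (card : String) (out : Int) : Decidable (Spec_wrap_calc_for_j card out) := by unfold Spec_wrap_calc_for_j; infer_instance

-- ===== CLAIM (what is proved, stated in full; the proofs are below) =====
def Claim_equal_wrap_calc_for_j : Prop := ∀ (card : String), Dom_wrap_calc_for_j card → Spec_wrap_calc_for_j card (wrap_calc_for_j card)

-- ===== LEMMAS AND PROOFS =====

-- the card obtained by turning every joker into the label L
def pvSubJ (L c : Char) : Char := if c = 'J' then L else c

-- group sizes of a hand, in first-occurrence order (= the counter dict's values)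
def pvValsOf (l : List Char) : List Int := (PySem.List.dedup l).map (fun c => (l.count c : Int))

-- group sizes with the joker group removed
def pvValsNoJ (l : List Char) : List Int :=
  ((PySem.List.dedup l).erase 'J').map (fun c => (l.count c : Int))

-- strength of the hand after substituting label L for the jokers
def pvFF (l : List Char) (L : Char) : Int := pvStrength (pvValsOf (l.map (pvSubJ L)))

def pvLabelChars : List Char := ['J', '2', '3', '4', '5', '6', '7', '8', '9', 'T', 'Q', 'K', 'A']









lemma pvStrength_perm {vs ws : List Int} (h : vs.Perm ws) : pvStrength vs = pvStrength ws := by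
  unfold pvStrength
  simp only [h.length_eq, h.mem_iff]

lemma pvCounterA (l : List Char) :
    l.foldl (fun d ch => if d.contains ch then d.insert ch (d.getD ch 0 + 1) else d.insert ch 1)
      PySem.Dict.empty = PySem.Dict.counter l := by
  rw [← PySem.Dict.foldl_insert_getD_add_one_eq_counter]
  congr 1
  funext d ch
  by_cases h : d.contains ch
  · simp [h]
  · simp [h, PySem.Dict.getD_of_not_contains _ _ (by simpa using h)]

lemma pvValues_counter (l : List Char) : (PySem.Dict.counter l).values = pvValsOf l := by
  show ((PySem.Dict.counter l).items.map (·.2)) = _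
  rw [PySem.Dict.items_counter]
  simp [pvValsOf, PySem.List.dedup_eq_ofList]

lemma pvSize_counter (l : List Char) : (PySem.Dict.counter l).size = (pvValsOf l).length := by
  show (PySem.Dict.counter l).items.length = _
  rw [PySem.Dict.items_counter]
  simp [pvValsOf, PySem.List.dedup_eq_ofList]

lemma pvCalc_eq (s : String) : calc_card_strength s = pvStrength (pvValsOf s.toList) := by
  unfold calc_card_strength pvStrength
  rw [pvCounterA]
  simp only [pvValues_counter, pvSize_counter]

lemma pvGo_single (c : Char) (l : List Char) : ∀ (fuel : Nat) (acc : List Char),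
    l.length ≤ fuel →
    PySem.Chars.replace.go ['J'] [c] fuel l acc = acc.reverse ++ l.map (pvSubJ c) := by
  induction l with
  | nil => intro fuel acc h; cases fuel <;> simp [PySem.Chars.replace.go]
  | cons x t ih =>
    intro fuel acc h
    cases fuel with
    | zero => simp at h
    | succ f =>
      simp only [PySem.Chars.replace.go]
      by_cases hx : x = 'J'
      · subst hx
        have hp : List.isPrefixOf ['J'] ('J' :: t) = true := by simp [List.isPrefixOf]
        simp only [hp, if_pos, List.length_cons, List.drop_succ_cons, List.length_nil,
          List.drop_zero]
        rw [ih f _ (by simpa using h)]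
        simp [pvSubJ]
      · have hp : List.isPrefixOf ['J'] (x :: t) = false := by
          simp [List.isPrefixOf]; exact fun h' => absurd h'.symm hx
        simp only [hp]
        rw [if_neg (by simp)]
        rw [ih f _ (by simpa using h)]
        simp [pvSubJ, hx]

lemma pvReplace_single (c : Char) (s : String) (L : String) (hL : L.toList = [c]) :
    (PySem.Str.replace s "J" L).toList = s.toList.map (pvSubJ c) := by
  rw [PySem.Str.toList_replace, hL]
  have hJ : ("J" : String).toList = ['J'] := by decide
  rw [hJ]
  unfold PySem.Chars.replace
  rw [if_neg (by simp)]
  exact pvGo_single c s.toList s.toList.length [] le_rfl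

lemma pvOutcomes_items (card : String) :
    (pvLabels.foldl (fun d label => d.insert label (calc_card_strength (PySem.Str.replace card "J" label)))
      PySem.Dict.empty).items
    = pvLabels.map (fun L => (L, calc_card_strength (PySem.Str.replace card "J" L))) := by
  have := PySem.Dict.items_foldl_insert_fresh (l := pvLabels) (k := fun L => L)
    (v := fun L => calc_card_strength (PySem.Str.replace card "J" L)) (d := PySem.Dict.empty)
    (by intro a _; simp [PySem.Dict.contains_empty]) (by simp [List.map_id']; decide)
  simpa using this

lemma pvWrapA_char (card : String) :
    (∃ L ∈ pvLabels, wrap_calc_for_j card = calc_card_strength (PySem.Str.replace card "J" L)) ∧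
    (∀ L ∈ pvLabels, calc_card_strength (PySem.Str.replace card "J" L) ≤ wrap_calc_for_j card) := by
  have hitems := pvOutcomes_items card
  unfold wrap_calc_for_j
  generalize hO : (pvLabels.foldl
    (fun d label => d.insert label (calc_card_strength (PySem.Str.replace card "J" label)))
    PySem.Dict.empty) = O at hitems ⊢
  have hkeys : O.keys = pvLabels := by
    simp only [PySem.Dict.keys, hitems, List.map_map, Function.comp_def, List.map_id']
  have hnd : O.keys.Nodup := by rw [hkeys]; decide
  have hgetD : ∀ L ∈ pvLabels, O.getD L 0 = calc_card_strength (PySem.Str.replace card "J" L) := by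
    intro L hL
    exact PySem.Dict.getD_of_mem_items O (by rw [hitems]; exact List.mem_map.2 ⟨L, hL, rfl⟩) hnd 0
  obtain ⟨m, hm⟩ : ∃ m, PySem.List.max? O.keys (fun x => O.getD x 0) = some m := by
    cases h : PySem.List.max? O.keys (fun x => O.getD x 0) with
    | none => rw [PySem.List.max?_eq_none_iff, hkeys] at h; exact absurd h (by decide)
    | some m => exact ⟨m, rfl⟩
  have hmmem : m ∈ pvLabels := hkeys ▸ PySem.List.max?_mem hm
  have hub := PySem.List.max?_isMax hm
  simp only [hm]
  constructor
  · exact ⟨m, hmmem, hgetD m hmmem⟩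
  · intro L hL
    have := hub L (hkeys ▸ hL)
    rwa [hgetD L hL] at this

lemma pvLabels_eq : pvLabels = pvLabelChars.map (fun c => String.ofList [c]) := by decide

lemma pvOutcome_single (card : String) (c : Char) :
    calc_card_strength (PySem.Str.replace card "J" (String.ofList [c])) = pvFF card.toList c := by
  rw [pvCalc_eq, pvFF, pvReplace_single c card _ (by simp)]

lemma pvA_mem (card : String) :
    ∃ L ∈ pvLabelChars, wrap_calc_for_j card = pvFF card.toList L := by
  obtain ⟨L, hL, hv⟩ := (pvWrapA_char card).1
  rw [pvLabels_eq] at hL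
  obtain ⟨c, hc, rfl⟩ := List.mem_map.1 hL
  exact ⟨c, hc, by rw [hv, pvOutcome_single]⟩

lemma pvA_ub (card : String) :
    ∀ L ∈ pvLabelChars, pvFF card.toList L ≤ wrap_calc_for_j card := by
  intro c hc
  have := (pvWrapA_char card).2 (String.ofList [c])
    (by rw [pvLabels_eq]; exact List.mem_map.2 ⟨c, hc, rfl⟩)
  rwa [pvOutcome_single] at this

lemma pvCount_map (l : List Char) (f : Char → Char) (a : Char) :
    (l.map f).count a = l.countP (fun b => f b == a) := by
  rw [List.count_eq_countP, List.countP_map]; rfl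

-- valsOf of the whole hand splits off the joker group
lemma pvValsOf_split (l : List Char) (hJ : 'J' ∈ l) :
    (pvValsOf l).Perm (pvValsNoJ l ++ [(l.count 'J' : Int)]) := by
  have h1 : (PySem.List.dedup l).Perm ('J' :: (PySem.List.dedup l).erase 'J') :=
    List.perm_cons_erase (by simp [PySem.List.dedup_eq_ofList, PySem.Set.mem_ofList, hJ])
  exact ((h1.map (fun c => (l.count c : Int))).trans (List.perm_append_singleton _ _).symm)

-- dedup of the substituted hand, L ∈ l case
lemma pvDedup_map_mem (l : List Char) (L : Char) (hL : L ∈ l) (hLJ : L ≠ 'J') :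
    (PySem.List.dedup (l.map (pvSubJ L))).Perm ((PySem.List.dedup l).erase 'J') := by
  have hnd1 : (PySem.List.dedup (l.map (pvSubJ L))).Nodup := by
    rw [PySem.List.dedup_eq_ofList]; exact PySem.Set.nodup_ofList _
  have hndd : (PySem.List.dedup l).Nodup := by
    rw [PySem.List.dedup_eq_ofList]; exact PySem.Set.nodup_ofList _
  have hnd2 : ((PySem.List.dedup l).erase 'J').Nodup := hndd.erase _
  rw [List.perm_ext_iff_of_nodup hnd1 hnd2]
  intro x
  rw [PySem.List.dedup_eq_ofList, PySem.Set.mem_ofList, hndd.mem_erase_iff,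
    PySem.List.dedup_eq_ofList, PySem.Set.mem_ofList, List.mem_map]
  constructor
  · rintro ⟨a, ha, rfl⟩
    by_cases haJ : a = 'J'
    · subst haJ; simp [pvSubJ]; exact ⟨hLJ, hL⟩
    · simp only [pvSubJ, if_neg haJ]; exact ⟨haJ, ha⟩
  · rintro ⟨hxJ, hx⟩
    exact ⟨x, hx, by simp [pvSubJ, hxJ]⟩

-- dedup of the substituted hand, L ∉ l case
lemma pvDedup_map_not_mem (l : List Char) (L : Char) (hL : L ∉ l) (hJ : 'J' ∈ l) :
    (PySem.List.dedup (l.map (pvSubJ L))).Perm (L :: (PySem.List.dedup l).erase 'J') := by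
  have hLJ : L ≠ 'J' := fun h => hL (h ▸ hJ)
  have hnd1 : (PySem.List.dedup (l.map (pvSubJ L))).Nodup := by
    rw [PySem.List.dedup_eq_ofList]; exact PySem.Set.nodup_ofList _
  have hndd : (PySem.List.dedup l).Nodup := by
    rw [PySem.List.dedup_eq_ofList]; exact PySem.Set.nodup_ofList _
  have hnd2 : (L :: (PySem.List.dedup l).erase 'J').Nodup := by
    refine List.nodup_cons.2 ⟨fun h => ?_, hndd.erase _⟩
    exact hL (by simpa [PySem.List.dedup_eq_ofList, PySem.Set.mem_ofList] using
      (hndd.mem_erase_iff.1 h).2)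
  rw [List.perm_ext_iff_of_nodup hnd1 hnd2]
  intro x
  rw [PySem.List.dedup_eq_ofList, PySem.Set.mem_ofList, List.mem_cons, hndd.mem_erase_iff,
    PySem.List.dedup_eq_ofList, PySem.Set.mem_ofList, List.mem_map]
  constructor
  · rintro ⟨a, ha, rfl⟩
    by_cases haJ : a = 'J'
    · subst haJ; simp [pvSubJ]
    · right; simp only [pvSubJ, if_neg haJ]; exact ⟨haJ, ha⟩
  · rintro (rfl | ⟨hxJ, hx⟩)
    · exact ⟨'J', hJ, by simp [pvSubJ]⟩
    · exact ⟨x, hx, by simp [pvSubJ, hxJ]⟩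

lemma pvCountP_L (l : List Char) (L : Char) (hLJ : L ≠ 'J') :
    l.countP (fun b => pvSubJ L b == L) = l.count 'J' + l.count L := by
  induction l with
  | nil => simp
  | cons x t ih =>
    by_cases hx : x = 'J'
    · subst hx
      rw [List.countP_cons, List.count_cons, List.count_cons, ih]
      simp [pvSubJ, hLJ.symm]
      omega
    · rw [List.countP_cons, List.count_cons, List.count_cons, ih]
      by_cases hxL : x = L
      · subst hxL; simp [pvSubJ, hx]; omega
      · simp [pvSubJ, hx, hxL]

lemma pvCountP_other (l : List Char) (L a : Char) (haL : a ≠ L) (haJ : a ≠ 'J') :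
    l.countP (fun b => pvSubJ L b == a) = l.count a := by
  induction l with
  | nil => simp
  | cons x t ih =>
    rw [List.countP_cons, List.count_cons, ih]
    by_cases hx : x = 'J'
    · subst hx; simp [pvSubJ, Ne.symm haL, Ne.symm haJ]
    · by_cases hxa : x = a
      · subst hxa; simp [pvSubJ, hx]
      · simp [pvSubJ, hx, hxa]

-- the group sizes of the substituted hand, L ∈ l
lemma pvVals_merge (l : List Char) (L : Char) (hL : L ∈ l) (hLJ : L ≠ 'J') :
    (pvValsOf (l.map (pvSubJ L))).Perm
      (((l.count L : Int) + (l.count 'J' : Int)) :: (pvValsNoJ l).erase (l.count L : Int)) := by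
  have hperm := (pvDedup_map_mem l L hL hLJ).map (fun c => ((l.map (pvSubJ L)).count c : Int))
  have hndd : (PySem.List.dedup l).Nodup := by
    rw [PySem.List.dedup_eq_ofList]; exact PySem.Set.nodup_ofList _
  -- rewrite the counts pointwise over the erased dedup list
  have hpt : ((PySem.List.dedup l).erase 'J').map (fun c => ((l.map (pvSubJ L)).count c : Int))
      = ((PySem.List.dedup l).erase 'J').map
          (fun c => if c = L then (l.count L : Int) + (l.count 'J' : Int) else (l.count c : Int)) := by
    apply List.map_congr_left
    intro a ha
    obtain ⟨haJ, haD⟩ := hndd.mem_erase_iff.1 ha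
    rw [pvCount_map]
    by_cases haL : a = L
    · subst haL; rw [if_pos rfl, pvCountP_L l a hLJ]; push_cast; ring
    · rw [if_neg haL, pvCountP_other l L a haL haJ]
  rw [hpt] at hperm
  -- split the erased dedup list at L
  have hLmem : L ∈ (PySem.List.dedup l).erase 'J' := by
    rw [hndd.mem_erase_iff]
    exact ⟨hLJ, by simp [PySem.List.dedup_eq_ofList, PySem.Set.mem_ofList, hL]⟩
  have hsplit := List.perm_cons_erase hLmem
  have h2 := hsplit.map (fun c => if c = L then (l.count L : Int) + (l.count 'J' : Int) else (l.count c : Int))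
  have h3 := hsplit.map (fun c => (l.count c : Int))
  -- the erased list without L has no more L's, so both maps agree there
  have hndE : ((PySem.List.dedup l).erase 'J').Nodup := hndd.erase _
  have hnoL : ∀ a ∈ (((PySem.List.dedup l).erase 'J').erase L), a ≠ L := by
    intro a ha; exact (hndE.mem_erase_iff.1 ha).1
  have hagree : ((((PySem.List.dedup l).erase 'J').erase L).map
      (fun c => if c = L then (l.count L : Int) + (l.count 'J' : Int) else (l.count c : Int)))
      = ((((PySem.List.dedup l).erase 'J').erase L).map (fun c => (l.count c : Int))) := by
    apply List.map_congr_left; intro a ha; rw [if_neg (hnoL a ha)]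
  rw [List.map_cons, if_pos rfl, hagree] at h2
  -- assemble: valsOf(map) ~ (c+j) :: map cnt (eraseJ.erase L), and valsNoJ.erase c ~ map cnt (eraseJ.erase L)
  refine (hperm.trans h2).trans (List.Perm.cons _ ?_)
  have h4 : (pvValsNoJ l).Perm ((l.count L : Int) :: (((PySem.List.dedup l).erase 'J').erase L).map (fun c => (l.count c : Int))) := by
    simpa using h3
  have h5 := h4.erase (l.count L : Int)
  rw [List.erase_cons_head] at h5
  exact h5.symm

-- the group sizes of the substituted hand, L ∉ l: the joker group is renamed
lemma pvVals_rename (l : List Char) (L : Char) (hJ : 'J' ∈ l) (hL : L ∉ l) :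
    (pvValsOf (l.map (pvSubJ L))).Perm (pvValsNoJ l ++ [(l.count 'J' : Int)]) := by
  have hLJ : L ≠ 'J' := fun h => hL (h ▸ hJ)
  have hndd : (PySem.List.dedup l).Nodup := by
    rw [PySem.List.dedup_eq_ofList]; exact PySem.Set.nodup_ofList _
  have hperm := (pvDedup_map_not_mem l L hL hJ).map (fun c => ((l.map (pvSubJ L)).count c : Int))
  have hL0 : l.count L = 0 := List.count_eq_zero.2 hL
  have hpt : (L :: (PySem.List.dedup l).erase 'J').map (fun c => ((l.map (pvSubJ L)).count c : Int))
      = (l.count 'J' : Int) :: pvValsNoJ l := by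
    rw [List.map_cons]
    congr 1
    · rw [pvCount_map, pvCountP_L l L hLJ, hL0]; push_cast; ring
    · apply List.map_congr_left
      intro a ha
      obtain ⟨haJ, haD⟩ := hndd.mem_erase_iff.1 ha
      have haL : a ≠ L := fun h => hL (h ▸ (by simpa [PySem.List.dedup_eq_ofList, PySem.Set.mem_ofList] using haD))
      rw [pvCount_map, pvCountP_other l L a haL haJ]
  rw [hpt] at hperm
  exact hperm.trans (List.perm_append_singleton _ _).symm

-- no jokers: substitution is the identity
lemma pvMap_id (l : List Char) (L : Char) (hJ : 'J' ∉ l) : l.map (pvSubJ L) = l := by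
  conv_rhs => rw [← List.map_id l]
  apply List.map_congr_left
  intro a ha
  have : a ≠ 'J' := fun h => hJ (h ▸ ha)
  simp [pvSubJ, this]

lemma pvSubJJ (l : List Char) : l.map (pvSubJ 'J') = l := by
  conv_rhs => rw [← List.map_id l]
  apply List.map_congr_left
  intro a _
  by_cases h : a = 'J' <;> simp [pvSubJ, h]

lemma pvValsNoJ_eq_valsOf (l : List Char) (hJ : 'J' ∉ l) : pvValsNoJ l = pvValsOf l := by
  unfold pvValsNoJ pvValsOf
  rw [List.erase_of_not_mem]
  intro h
  exact hJ (by simpa [PySem.List.dedup_eq_ofList, PySem.Set.mem_ofList] using h)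

lemma pvCountsB_items (l : List Char) :
    ((PySem.Dict.counter l).erase 'J').items
      = ((PySem.List.dedup l).erase 'J').map (fun k => (k, (l.count k : Int))) := by
  have hndd : (PySem.List.dedup l).Nodup := by
    rw [PySem.List.dedup_eq_ofList]; exact PySem.Set.nodup_ofList _
  show ((PySem.Dict.counter l).items.filter (fun p => !p.1 == 'J')) = _
  rw [PySem.Dict.items_counter, List.filter_map, hndd.erase_eq_filter, PySem.List.dedup_eq_ofList]
  rfl

lemma pvCountsB_values (l : List Char) :
    ((PySem.Dict.counter l).erase 'J').values = pvValsNoJ l := by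
  show (((PySem.Dict.counter l).erase 'J').items.map (·.2)) = _
  rw [pvCountsB_items]
  simp [pvValsNoJ]

lemma pvCountsB_keys (l : List Char) :
    ((PySem.Dict.counter l).erase 'J').keys = (PySem.List.dedup l).erase 'J' := by
  show (((PySem.Dict.counter l).erase 'J').items.map (·.1)) = _
  rw [pvCountsB_items, List.map_map]
  exact List.map_id _

lemma pvCountsB_getD (l : List Char) (k : Char) (hk : k ∈ (PySem.List.dedup l).erase 'J') :
    ((PySem.Dict.counter l).erase 'J').getD k 0 = (l.count k : Int) := by
  have hndd : (PySem.List.dedup l).Nodup := by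
    rw [PySem.List.dedup_eq_ofList]; exact PySem.Set.nodup_ofList _
  refine PySem.Dict.getD_of_mem_items _ ?_ ?_ 0
  · rw [pvCountsB_items]; exact List.mem_map.2 ⟨k, hk, rfl⟩
  · rw [pvCountsB_keys]; exact hndd.erase _

lemma pvFoldMax_mem {α : Type} (t : List α) (g : α → Int) (a : Int) :
    t.foldl (fun b c => max b (g c)) a = a ∨ ∃ c ∈ t, t.foldl (fun b c => max b (g c)) a = g c := by
  induction t generalizing a with
  | nil => exact Or.inl rfl
  | cons x s ih =>
    simp only [List.foldl_cons]
    rcases ih (max a (g x)) with h | ⟨c, hc, h⟩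
    · rcases max_choice a (g x) with hm | hm
      · exact Or.inl (h.trans hm)
      · exact Or.inr ⟨x, List.mem_cons_self, h.trans hm⟩
    · exact Or.inr ⟨c, List.mem_cons_of_mem _ hc, h⟩

lemma pvCand_perm (vs : List Int) (c w : Int) (hc : c ∈ vs) :
    (PySem.List.slice vs none (some (((PySem.List.index? vs c).getD 0 : Nat) : Int)) ++ [w] ++
     PySem.List.slice vs (some ((((PySem.List.index? vs c).getD 0 : Nat) : Int) + 1)) none).Perm
      (w :: vs.erase c) := by
  obtain ⟨i, hi⟩ : ∃ i, PySem.List.index? vs c = some i := by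
    cases h : PySem.List.index? vs c with
    | none => rw [PySem.List.index?_eq_none_iff] at h; exact absurd hc h
    | some i => exact ⟨i, rfl⟩
  obtain ⟨pre, suf, rfl, hlen, hpre⟩ := (PySem.List.index?_eq_some_iff _ _ _).1 hi
  rw [hi]
  simp only [Option.getD_some]
  have h1 : PySem.List.slice (pre ++ c :: suf) none (some ((i : Nat) : Int)) = pre := by
    rw [PySem.List.slice_to_natCast, ← hlen, List.take_left]
  have hcast : (((i : Nat) : Int) + 1) = (((i + 1 : Nat) : Int)) := by push_cast; ring
  have h2 : PySem.List.slice (pre ++ c :: suf) (some (((i : Nat) : Int) + 1)) none = suf := by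
    rw [hcast, PySem.List.slice_from_natCast, ← hlen]
    simp [List.drop_append]
  rw [h1, h2, List.erase_append_right _ (by simpa using hpre), List.erase_cons_head]
  have : pre ++ [w] ++ suf = pre ++ w :: suf := by simp
  rw [this]
  exact List.perm_middle

lemma pvGrow_eq (vs : List Int) (j c : Int) (hc : c ∈ vs) :
    pvGrow vs j c = pvStrength ((c + j) :: vs.erase c) := by
  unfold pvGrow
  exact pvStrength_perm (pvCand_perm vs c (c + j) hc)

lemma pvB_char (card : String) :
    (∃ L ∈ pvLabelChars, wrap_calc_for_j_alt card = pvFF card.toList L) ∧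
    (∀ L ∈ pvLabelChars, pvFF card.toList L ≤ wrap_calc_for_j_alt card) := by
  unfold wrap_calc_for_j_alt
  simp only [PySem.Dict.foldl_insert_getD_add_one_eq_counter, PySem.Dict.getD_counter,
    pvCountsB_values]
  set l := card.toList with hl
  have hndd : (PySem.List.dedup l).Nodup := by
    rw [PySem.List.dedup_eq_ofList]; exact PySem.Set.nodup_ofList _
  by_cases hJ : 'J' ∈ l
  · -- there is at least one joker
    have hcnt : l.count 'J' ≠ 0 := by
      simpa using List.count_pos_iff.2 hJ |>.ne'
    rw [if_neg (by exact_mod_cast hcnt)]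
    set j : Int := (l.count 'J' : Int) with hj
    set vals := pvValsNoJ l with hvals
    set best0 := pvStrength (vals ++ [j]) with hbest0
    set candL := (("23456789TQKA".toList).filter
      (fun ch => ((PySem.Dict.counter l).erase 'J').contains ch)).map
      (fun ch => ((PySem.Dict.counter l).erase 'J').getD ch 0) with hcandL
    -- facts about members of the candidate pool
    have hmemkeys : ∀ ch : Char, ((PySem.Dict.counter l).erase 'J').contains ch = true ↔
        ch ≠ 'J' ∧ ch ∈ l := by
      intro ch
      rw [PySem.Dict.contains_iff_mem_keys, pvCountsB_keys, hndd.mem_erase_iff,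
        PySem.List.dedup_eq_ofList, PySem.Set.mem_ofList]
    have hFF0 : pvFF l 'J' = best0 := by
      unfold pvFF
      rw [pvSubJJ]
      exact pvStrength_perm (pvValsOf_split l hJ)
    have hgrow : ∀ ch : Char, ch ∈ l → ch ≠ 'J' →
        pvFF l ch = pvGrow vals j (l.count ch : Int) := by
      intro ch hch hchJ
      have hcmem : (l.count ch : Int) ∈ vals := by
        rw [hvals]
        exact List.mem_map.2 ⟨ch, hndd.mem_erase_iff.2
          ⟨hchJ, by simp [PySem.List.dedup_eq_ofList, PySem.Set.mem_ofList, hch]⟩, rfl⟩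
      rw [pvGrow_eq vals j _ hcmem]
      exact pvStrength_perm (pvVals_merge l ch hch hchJ)
    have htl : "23456789TQKA".toList = ['2','3','4','5','6','7','8','9','T','Q','K','A'] := by
      set_option maxRecDepth 8192 in decide
    have hstr_sub : ∀ x ∈ pvLabelChars, x ≠ 'J' → x ∈ "23456789TQKA".toList := by
      rw [htl]; simp [pvLabelChars]
    have hsub_str : ∀ x ∈ "23456789TQKA".toList, x ∈ pvLabelChars := by
      rw [htl]; simp [pvLabelChars]
    have hub := PySem.List.le_foldl_max_int (PySem.Set.ofList candL) (fun c => pvGrow vals j c) best0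
    constructor
    · -- the result is one of the substituted strengths
      rcases pvFoldMax_mem (PySem.Set.ofList candL) (fun c => pvGrow vals j c) best0 with h | ⟨c, hc, h⟩
      · exact ⟨'J', by decide, by rw [h, hFF0]⟩
      · rw [PySem.Set.mem_ofList, hcandL] at hc
        obtain ⟨ch, hchf, rfl⟩ := List.mem_map.1 hc
        obtain ⟨hchs, hchc⟩ := List.mem_filter.1 hchf
        obtain ⟨hchJ, hchl⟩ := (hmemkeys ch).1 hchc
        have hgd : ((PySem.Dict.counter l).erase 'J').getD ch 0 = (l.count ch : Int) :=
          pvCountsB_getD l ch (hndd.mem_erase_iff.2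
            ⟨hchJ, by simp [PySem.List.dedup_eq_ofList, PySem.Set.mem_ofList, hchl]⟩)
        refine ⟨ch, hsub_str ch hchs, ?_⟩
        rw [h, hgd, hgrow ch hchl hchJ]
    · -- every substituted strength is dominated
      intro L hL
      by_cases hLJ : L = 'J'
      · subst hLJ; rw [hFF0]; exact hub.1
      by_cases hLl : L ∈ l
      · have hc : (l.count L : Int) ∈ PySem.Set.ofList candL := by
          rw [PySem.Set.mem_ofList, hcandL]
          refine List.mem_map.2 ⟨L, List.mem_filter.2 ⟨hstr_sub L hL hLJ, (hmemkeys L).2 ⟨hLJ, hLl⟩⟩, ?_⟩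
          exact pvCountsB_getD l L (hndd.mem_erase_iff.2
            ⟨hLJ, by simp [PySem.List.dedup_eq_ofList, PySem.Set.mem_ofList, hLl]⟩)
        rw [hgrow L hLl hLJ]
        exact hub.2 _ hc
      · have : pvFF l L = best0 := by
          unfold pvFF
          exact pvStrength_perm (pvVals_rename l L hJ hLl)
        rw [this]; exact hub.1
  · -- no jokers: every substitution is the identity
    have hcnt : l.count 'J' = 0 := List.count_eq_zero.2 hJ
    rw [if_pos (by exact_mod_cast hcnt)]
    have hFF : ∀ L, pvFF l L = pvStrength (pvValsNoJ l) := by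
      intro L
      unfold pvFF
      rw [pvMap_id l L hJ, pvValsNoJ_eq_valsOf l hJ]
    exact ⟨⟨'J', by decide, (hFF 'J').symm⟩, fun L _ => le_of_eq (hFF L)⟩

lemma pvB_mem (card : String) :
    ∃ L ∈ pvLabelChars, wrap_calc_for_j_alt card = pvFF card.toList L :=
  (pvB_char card).1

lemma pvB_ub (card : String) :
    ∀ L ∈ pvLabelChars, pvFF card.toList L ≤ wrap_calc_for_j_alt card :=
  (pvB_char card).2

-- ===== VERDICT (by name: the statement is the Claim_ definition above) =====
theorem wrap_calc_for_j_spec : Claim_equal_wrap_calc_for_j := by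
  intro card _
  show wrap_calc_for_j card = wrap_calc_for_j_alt card
  obtain ⟨LA, hLA, hA⟩ := pvA_mem card
  obtain ⟨LB, hLB, hB⟩ := pvB_mem card
  exact le_antisymm (hA ▸ pvB_ub card LA hLA) (hB ▸ pvA_ub card LB hLB)
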